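-- pv_equiv track=rewrite | github.com/ecwu/bcsc | extract.py | get_course_pre
-- ===== SOURCE A (Python) =====
-- from typing import Dict, List, Optional, Tuple
--
-- def get_course_pre(course_raw: List[str]) -> str:
--     """Extract prerequisite information from raw course data."""
--     buffer = []
--     found_prereq = False
--     description_markers = ["Course Description:", "Course  Description", "Description:", "Course Description"]
--
--     for line in course_raw:
--         if "Pre-requisite(s):" in line:
--             found_prereq = True
--         if any(marker in line for marker in description_markers):
--             break
--         if found_prereq:
--             if "Pre-requisite(s):" in line:
--                 buffer.append(line.replace("Pre-requisite(s):", ""))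
--             else:
--                 buffer.append(line)
--     return "".join(buffer)
-- ===== SOURCE B (Python) =====
-- from typing import Dict, List, Optional, Tuple
--
-- def get_course_pre(course_raw: List[str]) -> str:
--     """Extract prerequisite information from raw course data."""
--     description_markers = ["Course Description:", "Course  Description", "Description:", "Course Description"]
--     end = next((i for i, line in enumerate(course_raw)
--                 if any(marker in line for marker in description_markers)), len(course_raw))
--     head = course_raw[:end]
--     start = next((i for i, line in enumerate(head) if "Pre-requisite(s):" in line), None)
--     if start is None:
--         return ""
--     return "".join(line.replace("Pre-requisite(s):", "") if "Pre-requisite(s):" in line else line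
--                    for line in head[start:])
-- ===== Notes on version B (the rewrite author's own statement) =====
-- stated objective: simpler
-- what changed: Replaced the flag-driven single pass with a boundary-first decomposition: find the first description-marker line (end) and the first prerequisite line before it (start), then join the mapped slice head[start:end].
import Mathlib
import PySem

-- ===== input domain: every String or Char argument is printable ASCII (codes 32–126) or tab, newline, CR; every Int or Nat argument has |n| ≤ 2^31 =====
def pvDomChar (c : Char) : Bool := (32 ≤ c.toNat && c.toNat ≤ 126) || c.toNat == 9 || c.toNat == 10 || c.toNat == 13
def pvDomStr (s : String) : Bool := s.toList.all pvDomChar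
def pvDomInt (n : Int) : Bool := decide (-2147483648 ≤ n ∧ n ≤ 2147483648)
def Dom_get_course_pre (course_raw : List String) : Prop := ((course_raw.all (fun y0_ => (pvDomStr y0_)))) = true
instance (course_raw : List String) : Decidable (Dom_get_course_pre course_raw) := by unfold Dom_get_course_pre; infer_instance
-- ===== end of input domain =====

-- B replaces A's flag-driven single pass by a boundary-first decomposition (find end/start indices, then
-- map-join the slice); objective: simpler. Same return value on every input (A is total).

-- ===== PORT A =====
def pvMarkers : List String := ["Course Description:", "Course  Description", "Description:", "Course Description"]

def pvIsDescr (line : String) : Bool := pvMarkers.any (fun m => PySem.Str.isIn m line)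

def pvIsPre (line : String) : Bool := PySem.Str.isIn "Pre-requisite(s):" line

-- the for-loop of A: state = (remaining lines, found_prereq flag); returns the buffer
def pvGoA : List String → Bool → List String
  | [], _ => []
  | line :: rest, found =>
    let found' := found || pvIsPre line
    if pvIsDescr line then []
    else if found' then
      (if pvIsPre line then PySem.Str.replace line "Pre-requisite(s):" "" else line) :: pvGoA rest found'
    else pvGoA rest found'

def get_course_pre (course_raw : List String) : String :=
  PySem.Str.join "" (pvGoA course_raw false)

-- ===== PORT B =====
def pvRepl (line : String) : String :=
  if pvIsPre line then PySem.Str.replace line "Pre-requisite(s):" "" else line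

def get_course_pre_alt (course_raw : List String) : String :=
  let e := (course_raw.findIdx? (fun line => pvIsDescr line)).getD course_raw.length
  let head := course_raw.take e
  match head.findIdx? (fun line => pvIsPre line) with
  | none => ""
  | some s => PySem.Str.join "" ((head.drop s).map pvRepl)

-- ===== PRECONDITION & SPEC =====
def Spec_get_course_pre (course_raw : List String) (out : String) : Prop := out = get_course_pre_alt course_raw
instance (course_raw : List String) (out : String) : Decidable (Spec_get_course_pre course_raw out) := by unfold Spec_get_course_pre; infer_instance

-- ===== CLAIM (what is proved, stated in full; the proofs are below) =====
def Claim_equal_get_course_pre : Prop := ∀ (course_raw : List String), Dom_get_course_pre course_raw → Spec_get_course_pre course_raw (get_course_pre course_raw)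

-- ===== LEMMAS AND PROOFS =====

-- once the flag is set, A appends (replaced) lines until the first description marker
theorem pvGoA_true (xs : List String) :
    pvGoA xs true = (xs.take ((xs.findIdx? (fun line => pvIsDescr line)).getD xs.length)).map pvRepl := by
  induction xs with
  | nil => rfl
  | cons line rest ih =>
    by_cases h : pvIsDescr line = true
    · simp [pvGoA, List.findIdx?_cons, h]
    · simp only [pvGoA, Bool.true_or, List.findIdx?_cons, h,
        Bool.false_eq_true, if_false]
      cases hf : rest.findIdx? (fun l => pvIsDescr l) <;>
        simp [hf, List.take_succ_cons, List.map_cons, pvRepl, ih]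

-- before the flag is set, A's loop equals B's boundary-and-slice computation
theorem pvGoA_false (xs : List String) :
    PySem.Str.join "" (pvGoA xs false) = get_course_pre_alt xs := by
  induction xs with
  | nil => rfl
  | cons line rest ih =>
    by_cases hd : pvIsDescr line = true
    · simp [pvGoA, hd, get_course_pre_alt, List.findIdx?_cons, PySem.Str.join]
    · by_cases hp : pvIsPre line = true
      · -- flag becomes true: B finds start = 0 in the head slice
        simp only [pvGoA, hp, Bool.or_true, if_neg hd, pvGoA_true]
        simp only [get_course_pre_alt, List.findIdx?_cons, hd, Bool.false_eq_true, if_false]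
        cases hf : rest.findIdx? (fun l => pvIsDescr l) <;>
          simp [List.take_succ_cons, List.findIdx?_cons, hp, pvRepl]
      · -- flag stays false: the line is skipped; B's start shifts by one
        simp only [pvGoA, hp, Bool.or_false, if_neg hd, Bool.false_eq_true, if_false, ih]
        simp only [get_course_pre_alt, List.findIdx?_cons, hd, Bool.false_eq_true, if_false]
        cases hf : rest.findIdx? (fun l => pvIsDescr l) <;>
          · simp only [Option.map_none, Option.map_some, Option.getD_none, Option.getD_some,
              List.length_cons, List.take_succ_cons, List.findIdx?_cons, hp,
              Bool.false_eq_true, if_false]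
            cases hg : (List.take _ rest).findIdx? (fun l => pvIsPre l) <;>
              simp [List.drop_succ_cons]

-- ===== VERDICT (by name: the statement is the Claim_ definition above) =====
theorem get_course_pre_spec : Claim_equal_get_course_pre := by
  intro xs _
  unfold Spec_get_course_pre get_course_pre
  exact pvGoA_false xs
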